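-- pv_equiv track=rewrite | github.com/0x414A/irods | iRODS/scripts/python/terminate_irods_processes.py | parse_formatted_lsof_output
-- ===== SOURCE A (Python) =====
-- def parse_formatted_lsof_output(output):
--     parsed_output = []
--     if output.strip():
--         for line in output.split():
--             if line[0] == output[0]:
--                 parsed_output.append({})
--             parsed_output[-1][line[0]] = line[1:]
--     return parsed_output
-- ===== SOURCE B (Python) =====
-- def parse_formatted_lsof_output(output):
--     tokens = output.split()
--     if not tokens:
--         return []
--     sentinel = output[0]
--     records = []
--     n = len(tokens)
--     i = 0
--     while i < n:
--         j = i + 1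
--         while j < n and tokens[j][0] != sentinel:
--             j += 1
--         records.append({t[0]: t[1:] for t in tokens[i:j]})
--         i = j
--     return records
-- ===== Notes on version B (the rewrite author's own statement) =====
-- stated objective: alternative
-- what changed: A's single mutating pass that conditionally appends a fresh dict and updates parsed_output[-1] per token is replaced by a two-pointer record scan: an inner scan finds each record's end at the next sentinel-headed token, and the record's dict is built in one comprehension over that token slice.
import Mathlib
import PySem

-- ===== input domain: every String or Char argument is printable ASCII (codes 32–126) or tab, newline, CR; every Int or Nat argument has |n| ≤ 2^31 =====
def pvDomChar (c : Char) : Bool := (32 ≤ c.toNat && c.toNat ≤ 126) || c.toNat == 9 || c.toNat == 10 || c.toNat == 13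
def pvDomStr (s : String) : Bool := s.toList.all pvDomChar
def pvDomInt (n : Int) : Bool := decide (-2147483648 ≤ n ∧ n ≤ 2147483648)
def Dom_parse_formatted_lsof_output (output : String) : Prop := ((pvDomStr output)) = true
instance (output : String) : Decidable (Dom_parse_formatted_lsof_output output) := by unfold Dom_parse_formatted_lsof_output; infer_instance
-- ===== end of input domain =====

-- B replaces A's single mutating pass (append dict / update parsed_output[-1]) by a two-pointer
-- record scan building each record's dict in one comprehension; objective: alternative (same cost).
-- Equivalence of the return values is claimed on Pre_ (exactly where A returns; A raises IndexError elsewhere).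

-- ===== PORT A =====
-- parsed_output[-1][line[0]] = line[1:] — update of the LAST dict of the list
def pvSetLast : List (PySem.Dict String String) → String → String → List (PySem.Dict String String)
  | [], _, _ => []              -- Python raises IndexError here; excluded by Pre_
  | [d], k, v => [d.insert k v]
  | d :: ds, k, v => d :: pvSetLast ds k v

-- one iteration of A's loop body (s = output[0]); tok = [] is unreachable: split() yields nonempty tokens
def pvAStep (s : Char) (st : List (PySem.Dict String String)) (tok : List Char) : List (PySem.Dict String String) :=
  match tok with
  | [] => st
  | c :: rest =>
      let st' := if c = s then st ++ [PySem.Dict.empty] else st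
      pvSetLast st' (String.mk [c]) (String.mk rest)

def parse_formatted_lsof_output (output : String) : List (List (String × String)) :=
  if PySem.Chars.strip output.toList = [] then []
  else
    match output.toList with
    | [] => []                  -- unreachable: strip nonempty forces output nonempty
    | s :: _ =>
        (((PySem.Chars.split₀ output.toList).foldl (pvAStep s) []).map PySem.Dict.items)

-- ===== PORT B =====
-- tokens[j][0] != sentinel, the inner-scan condition ([] is unreachable: split() tokens are nonempty)
def pvNotSent (s : Char) (u : List Char) : Bool := u.head? != some s

-- {t[0]: t[1:] for t in group}
def pvIns (d : PySem.Dict String String) (u : List Char) : PySem.Dict String String :=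
  match u with
  | [] => d
  | c :: rest => d.insert (String.mk [c]) (String.mk rest)

def pvGroupDict (grp : List (List Char)) : PySem.Dict String String :=
  grp.foldl pvIns PySem.Dict.empty

-- outer while: take the record ending at the next sentinel-headed token, recurse on the remainder
-- (fuel = ts.length is only a structural-termination guard; it is always sufficient)
def pvChunkGo (s : Char) : Nat → List (List Char) → List (PySem.Dict String String)
  | _, [] => []
  | 0, _ :: _ => []             -- unreachable: fuel ≥ list length
  | fuel + 1, t :: rest =>
      pvGroupDict (t :: rest.takeWhile (pvNotSent s)) ::
        pvChunkGo s fuel (rest.dropWhile (pvNotSent s))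

def pvChunk (s : Char) (ts : List (List Char)) : List (PySem.Dict String String) :=
  pvChunkGo s ts.length ts

def parse_formatted_lsof_output_alt (output : String) : List (List (String × String)) :=
  match PySem.Chars.split₀ output.toList, output.toList with
  | [], _ => []
  | _ :: _, [] => []            -- unreachable: a nonempty token list forces nonempty output
  | t :: rest, s :: _ => (pvChunk s (t :: rest)).map PySem.Dict.items

-- ===== PRECONDITION & SPEC =====
-- Pre_ excludes exactly the inputs where A raises IndexError: output has non-whitespace content
-- but begins with a whitespace character (then no dict was appended before parsed_output[-1]).
def Pre_parse_formatted_lsof_output (output : String) : Prop :=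
  output.toList.all PySem.Chars.isspace = true ∨
  output.toList.head?.any (fun c => !PySem.Chars.isspace c) = true
instance (output : String) : Decidable (Pre_parse_formatted_lsof_output output) := by
  unfold Pre_parse_formatted_lsof_output; infer_instance

def pvWitness_parse_formatted_lsof_output : String := "p12 cbash nx p7 cfoo"

def Spec_parse_formatted_lsof_output (output : String) (out : List (List (String × String))) : Prop :=
  out = parse_formatted_lsof_output_alt output
instance (output : String) (out : List (List (String × String))) : Decidable (Spec_parse_formatted_lsof_output output out) := by
  unfold Spec_parse_formatted_lsof_output; infer_instance

-- ===== CLAIM (what is proved, stated in full; the proofs are below) =====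
def Claim_equal_parse_formatted_lsof_output : Prop :=
  ∀ (output : String), Dom_parse_formatted_lsof_output output →
    Pre_parse_formatted_lsof_output output →
    Spec_parse_formatted_lsof_output output (parse_formatted_lsof_output output)

-- ===== LEMMAS AND PROOFS =====

-- split₀.go with an accumulator = accumulated tokens ++ go with empty accumulator
lemma pv_go_acc (cs : List Char) : ∀ (cur : List Char) (acc : List (List Char)),
    PySem.Chars.split₀.go cs cur acc = acc.reverse ++ PySem.Chars.split₀.go cs cur [] := by
  induction cs with
  | nil =>
      intro cur acc
      simp [PySem.Chars.split₀.go]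
      split_ifs <;> simp
  | cons c rest ih =>
      intro cur acc
      simp only [PySem.Chars.split₀.go]
      split_ifs with h1 h2
      · exact ih [] acc
      · rw [ih [] (cur.reverse :: acc), ih [] [cur.reverse]]
        simp
      · exact ih (c :: cur) acc

-- an all-whitespace string splits into no tokens
lemma pv_split_all_space (cs : List Char) (h : cs.all PySem.Chars.isspace = true) :
    PySem.Chars.split₀ cs = [] := by
  induction cs with
  | nil => simp [PySem.Chars.split₀, PySem.Chars.split₀.go]
  | cons c rest ih =>
      simp only [List.all_cons, Bool.and_eq_true] at h
      simp only [PySem.Chars.split₀, PySem.Chars.split₀.go, h.1, if_true, List.isEmpty_nil]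
      exact ih h.2

-- every token produced by split() is nonempty
lemma pv_go_tokens_ne_nil (cs : List Char) : ∀ (cur : List Char) (acc : List (List Char)),
    (∀ t ∈ acc, t ≠ []) → ∀ t ∈ PySem.Chars.split₀.go cs cur acc, t ≠ [] := by
  induction cs with
  | nil =>
      intro cur acc hacc t ht
      simp only [PySem.Chars.split₀.go] at ht
      split_ifs at ht with h
      · exact hacc t (List.mem_reverse.mp ht)
      · rcases List.mem_cons.mp (List.mem_reverse.mp ht) with h1 | h1
        · subst h1; simpa [List.isEmpty_iff] using h
        · exact hacc t h1
  | cons c rest ih =>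
      intro cur acc hacc t ht
      simp only [PySem.Chars.split₀.go] at ht
      split_ifs at ht with h1 h2
      · exact ih [] acc hacc t ht
      · refine ih [] (cur.reverse :: acc) ?_ t ht
        intro u hu
        rcases List.mem_cons.mp hu with h | h
        · subst h; simpa [List.isEmpty_iff] using h2
        · exact hacc u h
      · exact ih (c :: cur) acc hacc t ht

lemma pv_tokens_ne_nil (cs : List Char) : ∀ t ∈ PySem.Chars.split₀ cs, t ≠ [] := by
  intro t ht
  exact pv_go_tokens_ne_nil cs [] [] (by simp) t ht

-- when a word is in progress, go returns it (extended) as the first token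
lemma pv_go_first_token (cs : List Char) : ∀ (cur : List Char), cur ≠ [] →
    ∃ w rest, PySem.Chars.split₀.go cs cur [] = (cur.reverse ++ w) :: rest := by
  induction cs with
  | nil =>
      intro cur hcur
      refine ⟨[], [], ?_⟩
      simp [PySem.Chars.split₀.go, List.isEmpty_iff, hcur]
  | cons c rest ih =>
      intro cur hcur
      simp only [PySem.Chars.split₀.go]
      split_ifs with h1 h2
      · exact absurd (List.isEmpty_iff.mp h2) hcur
      · exact ⟨[], PySem.Chars.split₀.go rest [] [], by rw [pv_go_acc]; simp⟩
      · obtain ⟨w, r, hw⟩ := ih (c :: cur) (by simp)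
        exact ⟨c :: w, r, by simpa using hw⟩

-- a string with a non-whitespace head splits into a first token headed by that character
lemma pv_split_head (c : Char) (cs : List Char) (hc : PySem.Chars.isspace c = false) :
    ∃ w rest, PySem.Chars.split₀ (c :: cs) = (c :: w) :: rest := by
  simp only [PySem.Chars.split₀, PySem.Chars.split₀.go, hc]
  obtain ⟨w, rest, hw⟩ := pv_go_first_token cs [c] (by simp)
  exact ⟨w, rest, by simpa using hw⟩

-- strip is empty exactly on all-whitespace strings
lemma pv_strip_eq_nil_iff (cs : List Char) :
    PySem.Chars.strip cs = [] ↔ cs.all PySem.Chars.isspace = true := by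
  unfold PySem.Chars.strip PySem.Chars.rstrip PySem.Chars.lstrip
  rw [List.reverse_eq_nil_iff, List.dropWhile_eq_nil_iff]
  simp only [List.mem_reverse, List.all_eq_true]
  constructor
  · intro h x hx
    have hsplit := List.takeWhile_append_dropWhile (p := PySem.Chars.isspace) (l := cs)
    rw [← hsplit] at hx
    rcases List.mem_append.mp hx with h1 | h1
    · exact List.mem_takeWhile_imp h1
    · exact h x h1
  · intro h x hx
    exact h x ((List.dropWhile_sublist _).mem hx)

-- updating the last element of xs ++ [d] updates d
lemma pv_setLast_append (xs : List (PySem.Dict String String)) (d : PySem.Dict String String)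
    (k v : String) : pvSetLast (xs ++ [d]) k v = xs ++ [d.insert k v] := by
  induction xs with
  | nil => simp [pvSetLast]
  | cons x xs ih =>
      cases xs with
      | nil => simp [pvSetLast]
      | cons y ys => simpa [pvSetLast] using ih

-- pvChunkGo does not depend on the fuel once it covers the list length
lemma pv_chunkGo_fuel (s : Char) : ∀ (n : Nat) (ts : List (List Char)) (m : Nat),
    ts.length ≤ n → ts.length ≤ m → pvChunkGo s n ts = pvChunkGo s m ts := by
  intro n
  induction n with
  | zero =>
      intro ts m hn _
      cases ts with
      | nil => cases m <;> rfl
      | cons t r => simp at hn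
  | succ k ih =>
      intro ts m hn hm
      cases ts with
      | nil => cases m <;> rfl
      | cons t r =>
          cases m with
          | zero => simp at hm
          | succ j =>
              simp only [pvChunkGo]
              congr 1
              exact ih _ j
                (le_trans (List.length_dropWhile_le _ _) (by simpa using hn))
                (le_trans (List.length_dropWhile_le _ _) (by simpa using hm))

lemma pv_chunk_cons (s : Char) (t : List Char) (rest : List (List Char)) :
    pvChunk s (t :: rest) =
      pvGroupDict (t :: rest.takeWhile (pvNotSent s)) ::
        pvChunk s (rest.dropWhile (pvNotSent s)) := by
  simp only [pvChunk, List.length_cons, pvChunkGo]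
  congr 1
  exact pv_chunkGo_fuel s _ _ _ (List.length_dropWhile_le _ _) le_rfl

-- the heart of the proof: A's interleaved fold equals B's record decomposition
lemma pv_fold_chunk (s : Char) (ts : List (List Char)) :
    ∀ (st : List (PySem.Dict String String)) (d : PySem.Dict String String),
    (∀ u ∈ ts, u ≠ []) →
    ts.foldl (pvAStep s) (st ++ [d]) =
      st ++ (ts.takeWhile (pvNotSent s)).foldl pvIns d ::
        pvChunk s (ts.dropWhile (pvNotSent s)) := by
  induction ts with
  | nil =>
      intro st d _
      simp [pvChunk, pvChunkGo]
  | cons t ts ih =>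
      intro st d hne
      obtain ⟨c, w, rfl⟩ : ∃ c w, t = c :: w := by
        cases t with
        | nil => exact absurd rfl (hne [] (by simp))
        | cons c w => exact ⟨c, w, rfl⟩
      have hne' : ∀ u ∈ ts, u ≠ [] := fun u hu => hne u (by simp [hu])
      by_cases hc : c = s
      · subst hc
        have hstep : pvAStep c (st ++ [d]) (c :: w)
            = (st ++ [d]) ++ [pvIns PySem.Dict.empty (c :: w)] := by
          have h2 := pv_setLast_append (st ++ [d]) PySem.Dict.empty
            (String.mk [c]) (String.mk w)
          simp only [List.append_assoc, List.cons_append, List.nil_append] at h2 ⊢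
          simp [pvAStep, pvIns, h2]
        have hpred : pvNotSent c (c :: w) = false := by simp [pvNotSent]
        rw [List.foldl_cons, hstep, ih _ _ hne']
        rw [List.takeWhile_cons, List.dropWhile_cons, hpred]
        simp only [Bool.false_eq_true, if_false, List.foldl_nil]
        rw [pv_chunk_cons]
        simp [pvGroupDict, List.append_assoc]
      · have hstep : pvAStep s (st ++ [d]) (c :: w) = st ++ [pvIns d (c :: w)] := by
          simp [pvAStep, pvIns, hc, pv_setLast_append]
        have hpred : pvNotSent s (c :: w) = true := by simp [pvNotSent, hc]
        rw [List.foldl_cons, hstep, ih _ _ hne']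
        rw [List.takeWhile_cons, List.dropWhile_cons, hpred]
        simp

-- ===== VERDICT (by name: the statement is the Claim_ definition above) =====
theorem parse_formatted_lsof_output_spec : Claim_equal_parse_formatted_lsof_output := by
  intro output _ hpre
  unfold Spec_parse_formatted_lsof_output
  unfold Pre_parse_formatted_lsof_output at hpre
  rcases hpre with hall | htop
  · -- all-whitespace (or empty): both return []
    have hsplit := pv_split_all_space output.toList hall
    have hstrip : PySem.Chars.strip output.toList = [] := (pv_strip_eq_nil_iff _).mpr hall
    simp [parse_formatted_lsof_output, parse_formatted_lsof_output_alt, hsplit, hstrip]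
  · -- non-whitespace head
    obtain ⟨c, cs, htl⟩ : ∃ c cs, output.toList = c :: cs := by
      cases h : output.toList with
      | nil => rw [h] at htop; simp at htop
      | cons c cs => exact ⟨c, cs, rfl⟩
    rw [htl] at htop
    simp only [List.head?_cons, Option.any_some] at htop
    have hc : PySem.Chars.isspace c = false := by
      cases h : PySem.Chars.isspace c
      · rfl
      · rw [h] at htop; simp at htop
    have hall : output.toList.all PySem.Chars.isspace = false := by
      rw [htl]; simp [hc]
    have hstrip : PySem.Chars.strip output.toList ≠ [] := by
      intro h; rw [(pv_strip_eq_nil_iff _).mp h] at hall; simp at hall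
    obtain ⟨w, rest, hsplit'⟩ := pv_split_head c cs hc
    have hstrip' : PySem.Chars.strip (c :: cs) ≠ [] := by rw [← htl]; exact hstrip
    have hne := pv_tokens_ne_nil (c :: cs)
    rw [hsplit'] at hne
    have hne' : ∀ u ∈ rest, u ≠ [] := fun u hu => hne u (by simp [hu])
    -- A's side
    have hfirst : pvAStep c [] (c :: w) = [] ++ [pvIns PySem.Dict.empty (c :: w)] := by
      simp [pvAStep, pvIns, pvSetLast]
    have hA : parse_formatted_lsof_output output
        = ((pvChunk c ((c :: w) :: rest)).map PySem.Dict.items) := by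
      simp only [parse_formatted_lsof_output, htl, if_neg hstrip']
      rw [hsplit', List.foldl_cons, hfirst, pv_fold_chunk c rest _ _ hne']
      rw [pv_chunk_cons]
      simp [pvGroupDict]
    rw [hA]
    simp only [parse_formatted_lsof_output_alt, htl, hsplit']
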